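-- pv_equiv track=rewrite | github.com/rithvik1122/Anubuddhi | Results_FreeSim/extract_freeform_results.py | find_latest_version
-- ===== SOURCE A (Python) =====
-- def find_latest_version(experiments):
--     """Group experiments by name and find latest version"""
--     grouped = {}
--     for exp in experiments:
--         name = exp['base_name']
--         if name not in grouped:
--             grouped[name] = exp
--         else:
--             # Compare timestamps
--             if exp['timestamp'] > grouped[name]['timestamp']:
--                 grouped[name] = exp
--     return list(grouped.values())
-- ===== SOURCE B (Python) =====
-- def find_latest_version(experiments):
--     """Group experiments by name and find latest version"""
--     groups = {}
--     for exp in experiments: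
--         groups.setdefault(exp['base_name'], []).append(exp)
--     return [max(g, key=lambda e: e['timestamp']) for g in groups.values()]
-- ===== Notes on version B (the rewrite author's own statement) =====
-- stated objective: alternative
-- what changed: Instead of keeping one running best experiment per name inside the loop, B groups all experiments by base_name into lists in one pass and then takes max(group, key=timestamp) per group; first-appearance key order and first-wins tie-breaking are preserved because max returns the first maximal element.
-- outside the precondition, e.g. on find_latest_version([{'base_name': 'a'}]): A returns [{'base_name': 'a'}], B raises KeyError
import Mathlib
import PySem

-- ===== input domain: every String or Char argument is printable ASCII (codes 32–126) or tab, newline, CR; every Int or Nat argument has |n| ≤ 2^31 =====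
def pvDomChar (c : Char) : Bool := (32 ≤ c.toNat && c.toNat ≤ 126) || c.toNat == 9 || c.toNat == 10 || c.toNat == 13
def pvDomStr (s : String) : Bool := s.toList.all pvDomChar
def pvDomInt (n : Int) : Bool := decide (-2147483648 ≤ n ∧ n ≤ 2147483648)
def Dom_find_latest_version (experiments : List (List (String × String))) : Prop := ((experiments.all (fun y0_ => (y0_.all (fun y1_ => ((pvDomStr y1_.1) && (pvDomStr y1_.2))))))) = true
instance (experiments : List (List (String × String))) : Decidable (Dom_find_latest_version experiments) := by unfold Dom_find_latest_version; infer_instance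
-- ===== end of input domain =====

-- ===== PORT A =====
-- B groups experiments by base_name and takes the per-group maximum by timestamp,
-- instead of A's single running-best-per-name loop; same cost, different decomposition.
-- Shared helpers: dict lookup (first match) of the two fields, totalized with "" / skip;
-- under Pre_ both keys are present, so this matches Python exactly there.
def pvName (e : List (String × String)) : String := (List.lookup "base_name" e).getD ""
def pvTs (e : List (String × String)) : String := (List.lookup "timestamp" e).getD ""

-- literal port of A's loop: grouped[name] holds the current best experiment for that name
def find_latest_version (experiments : List (List (String × String))) : List (List (String × String)) :=
  (experiments.foldl (fun (grouped : PySem.Dict String (List (String × String))) exp =>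
      let name := pvName exp
      match grouped.get? name with
      | none => grouped.insert name exp
      | some cur => if pvTs cur < pvTs exp then grouped.insert name exp else grouped)
    PySem.Dict.empty).values

-- ===== PORT B =====
def find_latest_version_alt (experiments : List (List (String × String))) : List (List (String × String)) :=
  let groups : PySem.Dict String (List (List (String × String))) :=
    experiments.foldl (fun d exp => d.modify (pvName exp) [] (fun g => g ++ [exp])) PySem.Dict.empty
  groups.values.map (fun g => (PySem.List.max? g pvTs).getD [])

-- ===== PRECONDITION & SPEC =====
-- Pre_ = every experiment dict has the keys 'base_name' and 'timestamp' (else Python raises KeyError).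
-- This slightly narrows A's domain: A never reads 'timestamp' of an experiment that is alone in its
-- group, so A returns on such inputs while B (max with key) raises KeyError there — see claim cites.
def Pre_find_latest_version (experiments : List (List (String × String))) : Prop :=
  (experiments.all (fun e => (List.lookup "base_name" e).isSome && (List.lookup "timestamp" e).isSome)) = true
instance (experiments : List (List (String × String))) : Decidable (Pre_find_latest_version experiments) := by
  unfold Pre_find_latest_version; infer_instance
def pvWitness_find_latest_version : (List (List (String × String))) :=
  [[("base_name", "a"), ("timestamp", "1")], [("base_name", "a"), ("timestamp", "2")], [("base_name", "b"), ("timestamp", "0")]]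
def Spec_find_latest_version (experiments : List (List (String × String))) (out : List (List (String × String))) : Prop := out = find_latest_version_alt experiments
instance (experiments : List (List (String × String))) (out : List (List (String × String))) : Decidable (Spec_find_latest_version experiments out) := by unfold Spec_find_latest_version; infer_instance

-- ===== CLAIM (what is proved, stated in full; the proofs are below) =====
def Claim_equal_find_latest_version : Prop := ∀ (experiments : List (List (String × String))), Dom_find_latest_version experiments → Pre_find_latest_version experiments → Spec_find_latest_version experiments (find_latest_version experiments)

-- ===== LEMMAS AND PROOFS =====
-- abbreviations for the two fold steps (proof-local names for the ports' loops)
def stepA (grouped : PySem.Dict String (List (String × String))) (exp : List (String × String)) :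
    PySem.Dict String (List (String × String)) :=
  let name := pvName exp
  match grouped.get? name with
  | none => grouped.insert name exp
  | some cur => if pvTs cur < pvTs exp then grouped.insert name exp else grouped

-- A's running max, continued from an optional current best (= PySem.List.max?'s fold)
def runMax (acc : Option (List (String × String))) (g : List (List (String × String))) :
    Option (List (String × String)) :=
  g.foldl (fun acc x =>
    match acc with
    | none => some x
    | some m => if pvTs m < pvTs x then some x else some m) acc

theorem runMax_eq_max? (g : List (List (String × String))) :
    runMax none g = PySem.List.max? g pvTs := by
  unfold runMax PySem.List.max?
  congr 1
  funext acc x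
  cases acc with
  | none => rfl
  | some m => by_cases h : pvTs m < pvTs x <;> simp [h]

-- lookup in A's dict after the fold = running max over the matching experiments
theorem stepA_get? (l : List (List (String × String)))
    (d : PySem.Dict String (List (String × String))) (c : String) :
    (l.foldl stepA d).get? c = runMax (d.get? c) (l.filter (fun e => pvName e == c)) := by
  induction l generalizing d with
  | nil => rfl
  | cons e t ih =>
    simp only [List.foldl_cons, List.filter_cons]
    by_cases hc : pvName e = c
    · subst hc
      simp only [beq_self_eq_true, if_pos]
      show (t.foldl stepA (stepA d e)).get? (pvName e) = runMax (d.get? (pvName e)) (e :: _)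
      rw [ih]
      unfold stepA
      cases hg : d.get? (pvName e) with
      | none =>
        simp only [hg, PySem.Dict.get?_insert_self]
        rfl
      | some cur =>
        simp only [hg]
        by_cases hlt : pvTs cur < pvTs e
        · simp only [if_pos hlt, PySem.Dict.get?_insert_self]
          show runMax (some e) _ = runMax (if pvTs cur < pvTs e then some e else some cur) _
          rw [if_pos hlt]
        · simp only [if_neg hlt, hg]
          show runMax (some cur) _ = runMax (if pvTs cur < pvTs e then some e else some cur) _
          rw [if_neg hlt]
    · have hb : (pvName e == c) = false := beq_eq_false_iff_ne.mpr hc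
      simp only [hb, Bool.false_eq_true, ite_false]
      rw [ih]
      have : (stepA d e).get? c = d.get? c := by
        unfold stepA
        cases hg : d.get? (pvName e) with
        | none => simp only [hg]; exact PySem.Dict.get?_insert_of_ne d e (Ne.symm hc)
        | some cur =>
          simp only [hg]
          by_cases hlt : pvTs cur < pvTs e
          · rw [if_pos hlt]; exact PySem.Dict.get?_insert_of_ne d e (Ne.symm hc)
          · rw [if_neg hlt]
      rw [this]

-- keys of A's dict after the fold = ordered set-union of the names
theorem stepA_keys (l : List (List (String × String)))
    (d : PySem.Dict String (List (String × String))) :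
    (l.foldl stepA d).keys = PySem.Set.update d.keys (l.map pvName) := by
  induction l generalizing d with
  | nil => rfl
  | cons e t ih =>
    simp only [List.foldl_cons, List.map_cons]
    rw [ih]
    have hstep : (stepA d e).keys = PySem.Set.add d.keys (pvName e) := by
      unfold stepA
      cases hg : d.get? (pvName e) with
      | none =>
        have hnc : d.contains (pvName e) = false := by
          have := (PySem.Dict.get?_eq_none_iff_contains (d := d) (k := pvName e)).mp hg
          simpa using this
        have hsc : pvName e ∉ d.keys := by
          rw [PySem.Dict.contains_eq_decide_mem_keys] at hnc
          simpa using hnc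
        simp only [hg]
        rw [PySem.Dict.keys_insert_of_not_contains d e hnc]
        simp [PySem.Set.add, hsc]
      | some cur =>
        have hcc : d.contains (pvName e) = true := by
          by_contra hne
          have : d.get? (pvName e) = none :=
            (PySem.Dict.get?_eq_none_iff_contains (d := d) (k := pvName e)).mpr (by simpa using hne)
          simp [this] at hg
        have hsc : pvName e ∈ d.keys := by
          rw [PySem.Dict.contains_eq_decide_mem_keys] at hcc
          simpa using hcc
        simp only [hg]
        by_cases hlt : pvTs cur < pvTs e
        · rw [if_pos hlt, PySem.Dict.keys_insert_of_contains d e hcc]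
          simp [PySem.Set.add, hsc]
        · rw [if_neg hlt]
          simp [PySem.Set.add, hsc]
    rw [hstep]
    rfl

theorem find_latest_version_eq (experiments : List (List (String × String))) :
    find_latest_version experiments =
      (PySem.Set.ofList (experiments.map pvName)).map
        (fun n => (PySem.List.max? (experiments.filter (fun e => pvName e == n)) pvTs).getD []) := by
  unfold find_latest_version
  have hfold : ∀ d, experiments.foldl
      (fun (grouped : PySem.Dict String (List (String × String))) exp =>
        let name := pvName exp
        match grouped.get? name with
        | none => grouped.insert name exp
        | some cur => if pvTs cur < pvTs exp then grouped.insert name exp else grouped) d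
      = experiments.foldl stepA d := by
    intro d; rfl
  rw [hfold]
  have hkeys : (experiments.foldl stepA PySem.Dict.empty).keys
      = PySem.Set.ofList (experiments.map pvName) := by
    rw [stepA_keys]; rfl
  have hnd : (experiments.foldl stepA PySem.Dict.empty).keys.Nodup := by
    rw [hkeys]; exact PySem.Set.nodup_ofList _
  rw [PySem.Dict.values_eq_map_keys _ hnd []]
  rw [hkeys]
  apply List.map_congr_left
  intro n _
  rw [PySem.Dict.getD_eq_get?_getD, stepA_get?, PySem.Dict.get?_empty, runMax_eq_max?]

theorem find_latest_version_alt_eq (experiments : List (List (String × String))) :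
    find_latest_version_alt experiments =
      (PySem.Set.ofList (experiments.map pvName)).map
        (fun n => (PySem.List.max? (experiments.filter (fun e => pvName e == n)) pvTs).getD []) := by
  unfold find_latest_version_alt
  have hmap : experiments.foldl
      (fun (d : PySem.Dict String (List (List (String × String)))) exp =>
        d.modify (pvName exp) [] (fun g => g ++ [exp])) PySem.Dict.empty
      = experiments.foldl
          (fun (d : PySem.Dict String (List (List (String × String)))) exp =>
            d.modify (pvName exp) [] ((fun (_ : PySem.Dict String (List (List (String × String)))) (e : List (String × String)) (g : List (List (String × String))) => g ++ [e]) d exp)) PySem.Dict.empty := rfl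
  simp only []
  have hkeys : (experiments.foldl
      (fun (d : PySem.Dict String (List (List (String × String)))) exp =>
        d.modify (pvName exp) [] (fun g => g ++ [exp])) PySem.Dict.empty).keys
      = PySem.Set.ofList (experiments.map pvName) := by
    rw [hmap, PySem.Dict.keys_foldl_modify_key]; rfl
  have hnd : (experiments.foldl
      (fun (d : PySem.Dict String (List (List (String × String)))) exp =>
        d.modify (pvName exp) [] (fun g => g ++ [exp])) PySem.Dict.empty).keys.Nodup := by
    rw [hkeys]; exact PySem.Set.nodup_ofList _
  rw [PySem.Dict.values_eq_map_keys _ hnd []]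
  rw [hkeys, List.map_map]
  apply List.map_congr_left
  intro n _
  have hgetD : (experiments.foldl
      (fun (d : PySem.Dict String (List (List (String × String)))) exp =>
        d.modify (pvName exp) [] (fun g => g ++ [exp])) PySem.Dict.empty).getD n []
      = experiments.filter (fun e => pvName e == n) := by
    have h1 : experiments.foldl
        (fun (d : PySem.Dict String (List (List (String × String)))) exp =>
          d.modify (pvName exp) [] (fun g => g ++ [exp])) PySem.Dict.empty
        = ((experiments.map (fun e => (pvName e, e))).foldl
            (fun (d : PySem.Dict String (List (List (String × String)))) p =>
              d.modify p.1 [] (fun g => g ++ [p.2])) PySem.Dict.empty) := by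
      rw [List.foldl_map]
    rw [h1, PySem.Dict.getD_foldl_modify_append]
    simp [List.filter_map, Function.comp_def]
  simp only [Function.comp_apply, hgetD]

-- ===== VERDICT (by name: the statement is the Claim_ definition above) =====
theorem find_latest_version_spec : Claim_equal_find_latest_version := by
  intro experiments _ _
  unfold Spec_find_latest_version
  rw [find_latest_version_eq, find_latest_version_alt_eq]
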